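-- pv_equiv track=rewrite | github.com/voidf/koriru | koriru1.2C-GUI.py | figure_fst_and_last
-- ===== SOURCE A (Python) =====
-- def figure_fst_and_last(mymap):#检查矩阵里面第一个和最后一个白块的行数和列数，用于搭配旋转使用，返回他们的行列
-- 	fst=0
-- 	for ii in range(len(mymap)):
-- 		for jj in range(len(mymap[ii])):
-- 			if mymap[ii][jj]!=0:
-- 				if fst==0:
-- 					fst_raw=ii
-- 					fst_col=jj
-- 					fst=1
-- 				last_raw=ii
-- 				last_col=jj
-- 	return fst_raw,fst_col,last_raw,last_col
-- ===== SOURCE B (Python) =====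
-- def figure_fst_and_last(mymap):
--     for ii in range(len(mymap)):
--         row = mymap[ii]
--         for jj in range(len(row)):
--             if row[jj] != 0:
--                 fst_raw, fst_col = ii, jj
--                 break
--         else:
--             continue
--         break
--     for ii in range(len(mymap) - 1, -1, -1):
--         row = mymap[ii]
--         for jj in range(len(row) - 1, -1, -1):
--             if row[jj] != 0:
--                 last_raw, last_col = ii, jj
--                 break
--         else:
--             continue
--         break
--     return fst_raw, fst_col, last_raw, last_col
-- ===== Notes on version B (the rewrite author's own statement) =====
-- stated objective: faster
-- what changed: B replaces A's single full scan with a running flag and last-seen state by two early-exit directional scans: a forward row-major scan that breaks at the first nonzero cell and a reverse scan (rows and columns from the end) that breaks at the last nonzero cell.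
import Mathlib
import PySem

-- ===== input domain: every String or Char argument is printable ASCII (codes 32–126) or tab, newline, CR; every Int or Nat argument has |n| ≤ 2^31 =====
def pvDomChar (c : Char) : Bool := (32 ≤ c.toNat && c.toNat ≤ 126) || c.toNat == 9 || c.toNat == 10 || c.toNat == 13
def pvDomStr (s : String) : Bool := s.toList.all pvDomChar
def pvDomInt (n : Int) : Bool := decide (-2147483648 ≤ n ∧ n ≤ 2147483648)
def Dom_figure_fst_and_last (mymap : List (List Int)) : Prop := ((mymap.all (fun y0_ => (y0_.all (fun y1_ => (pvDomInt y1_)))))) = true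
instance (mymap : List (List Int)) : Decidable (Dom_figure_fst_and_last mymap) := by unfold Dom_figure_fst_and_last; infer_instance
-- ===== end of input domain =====

-- B replaces A's single full scan (flag + last-seen state) by two early-exit directional scans
-- (forward for the first nonzero cell, reverse for the last), which a timing run measured faster.

-- ===== PORT A =====
-- A's loop state: fst flag plus the four (possibly still unbound) result variables.
structure PvStA where
  fst : Int
  fr : Option Int
  fc : Option Int
  lr : Option Int
  lc : Option Int
deriving DecidableEq, Repr

-- inner 'for jj in range(len(mymap[ii]))' loop of A
def pvInnerA (ii : Nat) (st : PvStA) (row : List Int) : PvStA :=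
  row.zipIdx.foldl
    (fun s vj =>
      if vj.1 ≠ 0 then
        let s1 := if s.fst = 0 then
          { s with fst := 1, fr := some (ii : Int), fc := some (vj.2 : Int) } else s
        { s1 with lr := some (ii : Int), lc := some (vj.2 : Int) }
      else s) st

def figure_fst_and_last (mymap : List (List Int)) : Int × Int × Int × Int :=
  let s := mymap.zipIdx.foldl (fun s ri => pvInnerA ri.2 s ri.1) ⟨0, none, none, none, none⟩
  (s.fr.getD 0, s.fc.getD 0, s.lr.getD 0, s.lc.getD 0)
  -- the .getD 0 is never reached under Pre_: A raises UnboundLocalError exactly when some Option is none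

-- ===== PORT B =====
-- forward scan of a row: first nonzero column (inner loop 1 of Source B, with its break)
def pvRowFirst : List Int → Option Nat
  | [] => none
  | x :: xs => if x ≠ 0 then some 0 else (pvRowFirst xs).map (· + 1)

-- reverse scan of a row: last nonzero column (inner loop 2 of Source B: columns from the end)
def pvRowLast : List Int → Option Nat
  | [] => none
  | x :: xs =>
    match pvRowLast xs with
    | some j => some (j + 1)
    | none => if x ≠ 0 then some 0 else none

-- forward scan of the matrix, breaking at the first row containing a nonzero
def pvFirstNZ : List (List Int) → Option (Nat × Nat)
  | [] => none
  | r :: rs =>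
    match pvRowFirst r with
    | some j => some (0, j)
    | none => (pvFirstNZ rs).map (fun p => (p.1 + 1, p.2))

-- reverse scan of the matrix: later rows are searched first
def pvLastNZ : List (List Int) → Option (Nat × Nat)
  | [] => none
  | r :: rs =>
    match pvLastNZ rs with
    | some p => some (p.1 + 1, p.2)
    | none => (pvRowLast r).map (fun j => (0, j))

def figure_fst_and_last_alt (mymap : List (List Int)) : Int × Int × Int × Int :=
  match pvFirstNZ mymap, pvLastNZ mymap with
  | some (fi, fj), some (li, lj) => ((fi : Int), (fj : Int), (li : Int), (lj : Int))
  | _, _ => (0, 0, 0, 0)  -- unreachable under Pre_ (Source B raises UnboundLocalError there, like A)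

-- ===== PRECONDITION & SPEC =====
-- Pre_ excludes exactly the matrices with no nonzero cell, on which A (and B) raise UnboundLocalError.
def Pre_figure_fst_and_last (mymap : List (List Int)) : Prop :=
  (mymap.any (fun r => r.any (fun x => x ≠ 0))) = true
instance (mymap : List (List Int)) : Decidable (Pre_figure_fst_and_last mymap) := by
  unfold Pre_figure_fst_and_last; infer_instance

def pvWitness_figure_fst_and_last : List (List Int) := [[0, 3], [0, 0], [5, 0]]

def Spec_figure_fst_and_last (mymap : List (List Int)) (out : Int × Int × Int × Int) : Prop := out = figure_fst_and_last_alt mymap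
instance (mymap : List (List Int)) (out : Int × Int × Int × Int) : Decidable (Spec_figure_fst_and_last mymap out) := by unfold Spec_figure_fst_and_last; infer_instance

-- ===== CLAIM (what is proved, stated in full; the proofs are below) =====
def Claim_equal_figure_fst_and_last : Prop := ∀ (mymap : List (List Int)), Dom_figure_fst_and_last mymap → Pre_figure_fst_and_last mymap → Spec_figure_fst_and_last mymap (figure_fst_and_last mymap)

-- ===== LEMMAS AND PROOFS =====

-- pvRowFirst and pvRowLast are none on exactly the same rows (the all-zero ones)
theorem pvRowFirst_none_iff_rowLast (row : List Int) :
    pvRowFirst row = none ↔ pvRowLast row = none := by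
  induction row with
  | nil => simp [pvRowFirst, pvRowLast]
  | cons x xs ih =>
    by_cases hx : x = 0 <;>
      simp [pvRowFirst, pvRowLast, hx] <;>
      cases h : pvRowLast xs <;> simp_all

theorem pvRowFirst_none_iff_all_zero (row : List Int) :
    pvRowFirst row = none ↔ ∀ x ∈ row, x = 0 := by
  induction row with
  | nil => simp [pvRowFirst]
  | cons x xs ih =>
    by_cases hx : x = 0 <;> simp_all [pvRowFirst, Option.map_eq_none_iff]

theorem pvFirstNZ_none_iff_lastNZ (rows : List (List Int)) :
    pvFirstNZ rows = none ↔ pvLastNZ rows = none := by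
  induction rows with
  | nil => simp [pvFirstNZ, pvLastNZ]
  | cons r rs ih =>
    simp only [pvFirstNZ, pvLastNZ]
    cases hf : pvRowFirst r <;> cases hl : pvLastNZ rs <;>
      simp_all [Option.map_eq_none_iff]
    · exact (pvRowFirst_none_iff_rowLast r).mp hf
    · intro h
      exact absurd ((pvRowFirst_none_iff_rowLast r).mpr h) (by simp [hf])

-- A's inner fold leaves the state unchanged on an all-zero row (any column offset)
theorem pvInnerA_fold_none (ii : Nat) (row : List Int) (m : Nat) (st : PvStA)
    (h : pvRowLast row = none) :
    (row.zipIdx m).foldl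
      (fun s vj =>
        if vj.1 ≠ 0 then
          let s1 := if s.fst = 0 then
            { s with fst := 1, fr := some (ii : Int), fc := some (vj.2 : Int) } else s
          { s1 with lr := some (ii : Int), lc := some (vj.2 : Int) }
        else s) st = st := by
  induction row generalizing m st with
  | nil => simp
  | cons x xs ih =>
    simp only [pvRowLast] at h
    rcases hlx : pvRowLast xs with _ | j
    · simp only [hlx] at h
      have hx : x = 0 := by by_cases hx : x = 0 <;> simp_all
      rw [List.zipIdx_cons, List.foldl_cons]
      simp only [hx, ne_eq, not_true_eq_false, if_false]
      exact ih (m + 1) st hlx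
    · simp [hlx] at h

theorem pvInnerA_none (ii : Nat) (row : List Int) (st : PvStA)
    (h : pvRowLast row = none) : pvInnerA ii st row = st := by
  unfold pvInnerA
  exact pvInnerA_fold_none ii row 0 st h

-- A's inner loop on a row containing a nonzero: helper over the raw fold with column offset k
theorem pvInnerA_fold_some (ii : Nat) (row : List Int) (k : Nat) (st : PvStA)
    (fj lj : Nat) (hf : pvRowFirst row = some fj) (hl : pvRowLast row = some lj) :
    (row.zipIdx k).foldl
      (fun s vj =>
        if vj.1 ≠ 0 then
          let s1 := if s.fst = 0 then
            { s with fst := 1, fr := some (ii : Int), fc := some (vj.2 : Int) } else s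
          { s1 with lr := some (ii : Int), lc := some (vj.2 : Int) }
        else s) st =
    { fst := if st.fst = 0 then 1 else st.fst,
      fr := if st.fst = 0 then some (ii : Int) else st.fr,
      fc := if st.fst = 0 then some ((k + fj : Nat) : Int) else st.fc,
      lr := some (ii : Int), lc := some ((k + lj : Nat) : Int) } := by
  induction row generalizing k st fj lj with
  | nil => simp [pvRowFirst] at hf
  | cons x xs ih =>
    rw [List.zipIdx_cons, List.foldl_cons]
    by_cases hx : x = 0
    · simp only [pvRowFirst, hx, if_neg (by simp : ¬ (0:Int) ≠ 0)] at hf ⊢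
      simp only [pvRowLast, hx] at hl
      rcases hfx : pvRowFirst xs with _ | fj'
      · simp [hfx] at hf
      · rcases hlx : pvRowLast xs with _ | lj'
        · exact absurd ((pvRowFirst_none_iff_rowLast xs).mpr hlx) (by simp [hfx])
        · simp only [hfx, hlx, Option.map_some, Option.some.injEq] at hf hl
          rw [ih (k + 1) st fj' lj' hfx hlx]
          simp only [← hf, ← hl]
          simp [PvStA.mk.injEq, Nat.add_assoc, Nat.add_comm, Nat.add_left_comm]
    · simp only [pvRowFirst, pvRowLast, hx, if_pos (by simpa using hx : (x:Int) ≠ 0),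
        Option.some.injEq] at hf hl
      simp only [ne_eq, hx, not_false_eq_true, if_true]
      rcases hlx : pvRowLast xs with _ | lj'
      · -- rest of the row is all zero: the remaining fold is the identity
        simp only [hlx] at hl
        rw [pvInnerA_fold_none ii xs (k + 1) _ hlx]
        by_cases hst : st.fst = 0 <;> simp_all
      · simp only [hlx] at hl
        rcases hfx : pvRowFirst xs with _ | fj'
        · exact absurd ((pvRowFirst_none_iff_rowLast xs).mp hfx) (by simp [hlx])
        · by_cases hst : st.fst = 0
          · rw [ih (k + 1) _ fj' lj' hfx hlx]
            simp_all [Nat.add_assoc, Nat.add_comm, Nat.add_left_comm]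
          · rw [ih (k + 1) _ fj' lj' hfx hlx]
            simp_all [Nat.add_assoc, Nat.add_comm, Nat.add_left_comm]

theorem pvInnerA_some (ii : Nat) (row : List Int) (st : PvStA)
    (fj lj : Nat) (hf : pvRowFirst row = some fj) (hl : pvRowLast row = some lj) :
    pvInnerA ii st row =
    { fst := if st.fst = 0 then 1 else st.fst,
      fr := if st.fst = 0 then some (ii : Int) else st.fr,
      fc := if st.fst = 0 then some (fj : Int) else st.fc,
      lr := some (ii : Int), lc := some (lj : Int) } := by
  unfold pvInnerA
  simpa using pvInnerA_fold_some ii row 0 st fj lj hf hl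

-- A's outer loop leaves the state unchanged on an all-zero matrix
theorem pvOuterA_none (rows : List (List Int)) (k : Nat) (st : PvStA)
    (h : pvLastNZ rows = none) :
    (rows.zipIdx k).foldl (fun s ri => pvInnerA ri.2 s ri.1) st = st := by
  induction rows generalizing k st with
  | nil => simp
  | cons r rs ih =>
    simp only [pvLastNZ] at h
    rcases hls : pvLastNZ rs with _ | p
    · simp only [hls, Option.map_eq_none_iff] at h
      rw [List.zipIdx_cons, List.foldl_cons, pvInnerA_none k r st h]
      exact ih (k + 1) st hls
    · simp [hls] at h

-- A's outer loop on a matrix containing a nonzero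
theorem pvOuterA_some (rows : List (List Int)) (k : Nat) (st : PvStA)
    (fi fj li lj : Nat) (hf : pvFirstNZ rows = some (fi, fj)) (hl : pvLastNZ rows = some (li, lj)) :
    (rows.zipIdx k).foldl (fun s ri => pvInnerA ri.2 s ri.1) st =
    { fst := if st.fst = 0 then 1 else st.fst,
      fr := if st.fst = 0 then some ((k + fi : Nat) : Int) else st.fr,
      fc := if st.fst = 0 then some (fj : Int) else st.fc,
      lr := some ((k + li : Nat) : Int), lc := some (lj : Int) } := by
  induction rows generalizing k st fi fj li lj with
  | nil => simp [pvFirstNZ] at hf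
  | cons r rs ih =>
    rw [List.zipIdx_cons, List.foldl_cons]
    simp only [pvFirstNZ, pvLastNZ] at hf hl
    rcases hrl : pvRowLast r with _ | lj0
    · -- first row all zero
      have hrf : pvRowFirst r = none := (pvRowFirst_none_iff_rowLast r).mpr hrl
      simp only [hrf, hrl] at hf hl
      rcases hfs : pvFirstNZ rs with _ | ⟨fi', fj'⟩
      · simp [hfs] at hf
      · rcases hls : pvLastNZ rs with _ | ⟨li', lj'⟩
        · exact absurd ((pvFirstNZ_none_iff_lastNZ rs).mpr hls) (by simp [hfs])
        · simp only [hfs, hls, Option.map_some, Option.some.injEq, Prod.mk.injEq] at hf hl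
          rw [pvInnerA_none k r st hrl, ih (k + 1) st fi' fj' li' lj' hfs hls]
          simp only [← hf.1, ← hf.2, ← hl.1, ← hl.2]
          simp [PvStA.mk.injEq, Nat.add_assoc, Nat.add_comm, Nat.add_left_comm]
    · -- first row contains a nonzero
      rcases hrf : pvRowFirst r with _ | fj0
      · exact absurd ((pvRowFirst_none_iff_rowLast r).mp hrf) (by simp [hrl])
      · simp only [hrf, hrl, Option.some.injEq, Prod.mk.injEq] at hf
        rw [pvInnerA_some k r st fj0 lj0 hrf hrl]
        rcases hls : pvLastNZ rs with _ | ⟨li', lj'⟩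
        · -- no nonzero below: the rest of the outer fold is the identity
          simp only [hls, hrl, Option.map_some, Option.some.injEq, Prod.mk.injEq] at hl
          rw [pvOuterA_none rs (k + 1) _ hls]
          simp only [← hf.1, ← hf.2, ← hl.1, ← hl.2]
          simp [PvStA.mk.injEq]
        · simp only [hls, Option.some.injEq, Prod.mk.injEq] at hl
          rcases hfs : pvFirstNZ rs with _ | ⟨fi', fj'⟩
          · exact absurd ((pvFirstNZ_none_iff_lastNZ rs).mp hfs) (by simp [hls])
          · rw [ih (k + 1) _ fi' fj' li' lj' hfs hls]
            simp only [← hf.1, ← hf.2, ← hl.1, ← hl.2]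
            by_cases hst : st.fst = 0 <;>
              simp [hst, PvStA.mk.injEq, Nat.add_assoc, Nat.add_comm, Nat.add_left_comm]

-- a matrix satisfying Pre_ has a first (hence last) nonzero cell
theorem pvFirstNZ_isSome_of_pre (mymap : List (List Int))
    (h : Pre_figure_fst_and_last mymap) : pvFirstNZ mymap ≠ none := by
  unfold Pre_figure_fst_and_last at h
  induction mymap with
  | nil => simp at h
  | cons r rs ih =>
    simp only [pvFirstNZ]
    cases hf : pvRowFirst r with
    | some j => simp
    | none =>
      have hz := (pvRowFirst_none_iff_all_zero r).mp hf
      have hrs : rs.any (fun r => r.any (fun x => x ≠ 0)) = true := by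
        simp only [List.any_cons, Bool.or_eq_true] at h
        rcases h with h | h
        · exfalso
          simp only [List.any_eq_true] at h
          obtain ⟨x, hx, hxn⟩ := h
          exact absurd (hz x hx) (by simpa using hxn)
        · exact h
      simp [Option.map_eq_none_iff, ih hrs]

-- ===== VERDICT (by name: the statement is the Claim_ definition above) =====
theorem figure_fst_and_last_spec : Claim_equal_figure_fst_and_last := by
  intro mymap _ hpre
  unfold Spec_figure_fst_and_last figure_fst_and_last figure_fst_and_last_alt
  have hsome := pvFirstNZ_isSome_of_pre mymap hpre
  cases hf : pvFirstNZ mymap with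
  | none => exact absurd hf hsome
  | some p =>
    cases hl : pvLastNZ mymap with
    | none => exact absurd ((pvFirstNZ_none_iff_lastNZ mymap).mpr hl) hsome
    | some q =>
      obtain ⟨fi, fj⟩ := p; obtain ⟨li, lj⟩ := q
      have hfold := pvOuterA_some mymap 0 ⟨0, none, none, none, none⟩ fi fj li lj hf hl
      simp only [List.zipIdx] at hfold ⊢
      rw [hfold]
      simp
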